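-- pv_equiv track=rewrite | github.com/locotive/stay_buan | crawlers/naver_api_crawler.py | check_keyword_conditions
-- ===== SOURCE A (Python) =====
-- def check_keyword_conditions(text, keywords):
--     """키워드 AND/OR 조건을 검사"""
--     if not text or not keywords:
--         return False
--
--     # 지역 키워드 (항상 포함되어야 함)
--     region_keyword = keywords[0]['text'] if keywords else None
--     if not region_keyword or region_keyword.lower() not in text.lower():
--         return False
--
--     # 키워드가 1개만 있으면 (지역 키워드만) 무조건 통과
--     if len(keywords) == 1:
--         return True
--
--     # AND 키워드가 있는지 확인
--     and_keywords = [k['text'] for k in keywords[1:] if k['condition'] == 'AND' and k['text']]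
--     # OR 키워드가 있는지 확인
--     or_keywords = [k['text'] for k in keywords[1:] if k['condition'] == 'OR' and k['text']]
--
--     # AND 키워드가 없고 OR 키워드도 없으면, 지역 키워드만 있으므로 통과
--     if not and_keywords and not or_keywords:
--         return True
--
--     # AND 키워드가 있고 OR 키워드가 없는 경우: 지역키워드 + AND 키워드 중 하나라도 포함되면 통과 (완화된 조건)
--     if and_keywords and not or_keywords:
--         for kw in and_keywords:
--             if kw.lower() in text.lower():
--                 return True
--         return False  # 어떤 AND 키워드도 포함되지 않음
--
--     # AND 키워드가 없고 OR 키워드만 있는 경우: 지역키워드 + OR 키워드 중 하나라도 포함되면 통과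
--     if not and_keywords and or_keywords:
--         for kw in or_keywords:
--             if kw.lower() in text.lower():
--                 return True
--         return False  # 어떤 OR 키워드도 포함되지 않음
--
--     # AND 키워드와 OR 키워드가 모두 있는 경우
--     # AND 키워드 중 하나라도 포함되고 OR 키워드 중 하나라도 포함되면 통과 (완화된 조건)
--     and_found = False
--     for kw in and_keywords:
--         if kw.lower() in text.lower():
--             and_found = True
--             break
--
--     or_found = False
--     for kw in or_keywords:
--         if kw.lower() in text.lower():
--             or_found = True
--             break
--
--     return and_found and or_found
-- ===== SOURCE B (Python) =====
-- def check_keyword_conditions(text, keywords):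
--     """키워드 AND/OR 조건을 검사 (single fused pass, no intermediate lists)"""
--     if not text or not keywords:
--         return False
--     t = text.lower()
--     region = keywords[0]['text']
--     if not region or region.lower() not in t:
--         return False
--     has_and = hit_and = has_or = hit_or = False
--     for k in keywords[1:]:
--         cond = k['condition']
--         if cond == 'AND' and k['text']:
--             has_and = True
--             hit_and = hit_and or k['text'].lower() in t
--         elif cond == 'OR' and k['text']:
--             has_or = True
--             hit_or = hit_or or k['text'].lower() in t
--     return (not has_and or hit_and) and (not has_or or hit_or)
-- ===== Notes on version B (the rewrite author's own statement) =====
-- stated objective: simpler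
-- what changed: Replaced A's two list-comprehension passes over keywords[1:] plus a 4-way case analysis (and three duplicated scan loops) by a single fused pass that maintains four boolean flags (has_and, hit_and, has_or, hit_or) and one final boolean formula; the text is lowered once instead of per comparison.
import Mathlib
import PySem

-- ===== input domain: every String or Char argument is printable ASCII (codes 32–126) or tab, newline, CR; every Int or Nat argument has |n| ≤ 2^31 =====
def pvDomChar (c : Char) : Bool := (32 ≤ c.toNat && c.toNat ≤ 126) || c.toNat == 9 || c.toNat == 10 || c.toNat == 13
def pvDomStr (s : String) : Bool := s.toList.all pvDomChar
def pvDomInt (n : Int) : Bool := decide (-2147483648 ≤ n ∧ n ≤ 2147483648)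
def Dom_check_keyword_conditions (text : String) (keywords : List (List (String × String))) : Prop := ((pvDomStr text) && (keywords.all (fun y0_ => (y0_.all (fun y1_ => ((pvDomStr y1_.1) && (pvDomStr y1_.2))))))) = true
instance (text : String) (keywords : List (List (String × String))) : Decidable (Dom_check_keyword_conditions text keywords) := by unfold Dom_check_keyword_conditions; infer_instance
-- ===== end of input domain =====

-- B replaces A's two list-comprehension passes plus the 4-way case analysis by one fused fold
-- over keywords[1:] maintaining four flags; objective: simpler (same asymptotic cost).

-- d[k]: first-match lookup in the association list; total with default "" — exact under Pre_ (key present)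
def pvLookup (d : List (String × String)) (k : String) : String :=
  ((d.find? (fun p => p.1 == k)).map (·.2)).getD ""

def pvHasKey (d : List (String × String)) (k : String) : Bool :=
  (d.find? (fun p => p.1 == k)).isSome

-- filter truthiness of "k['condition'] == 'AND' and k['text']" (resp. 'OR')
def pvIsAnd (k : List (String × String)) : Bool :=
  pvLookup k "condition" == "AND" && !(pvLookup k "text" == "")
def pvIsOr (k : List (String × String)) : Bool :=
  pvLookup k "condition" == "OR" && !(pvLookup k "text" == "")

-- "kw.lower() in text.lower()"
def pvMatch (text kw : String) : Bool :=
  PySem.Str.isIn (PySem.Str.lower kw) (PySem.Str.lower text)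

-- ===== PORT A =====
-- region_keyword = keywords[0]['text'] if keywords else None  (None ported as "")
def pvRegion (keywords : List (List (String × String))) : String :=
  if keywords = [] then "" else pvLookup (keywords.headD []) "text"

-- and_keywords / or_keywords list comprehensions over keywords[1:]
def pvAndK (keywords : List (List (String × String))) : List String :=
  ((PySem.List.slice keywords (some 1) none).filter pvIsAnd).map (fun k => pvLookup k "text")
def pvOrK (keywords : List (List (String × String))) : List String :=
  ((PySem.List.slice keywords (some 1) none).filter pvIsOr).map (fun k => pvLookup k "text")

def check_keyword_conditions (text : String) (keywords : List (List (String × String))) : Bool :=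
  if text = "" ∨ keywords = [] then false
  else if pvRegion keywords = "" ∨ pvMatch text (pvRegion keywords) = false then false
  else if keywords.length = 1 then true
  else if pvAndK keywords = [] ∧ pvOrK keywords = [] then true
  else if pvAndK keywords ≠ [] ∧ pvOrK keywords = [] then
    -- for-loop with early return over and_keywords
    (pvAndK keywords).any (fun kw => pvMatch text kw)
  else if pvAndK keywords = [] ∧ pvOrK keywords ≠ [] then
    (pvOrK keywords).any (fun kw => pvMatch text kw)
  else
    -- and_found / or_found loops with break, then "and_found and or_found"
    ((pvAndK keywords).any (fun kw => pvMatch text kw)) &&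
    ((pvOrK keywords).any (fun kw => pvMatch text kw))

-- ===== PORT B =====
-- loop body: state (has_and, hit_and, has_or, hit_or), t the pre-lowered text
def pvStep (t : String) (s : Bool × Bool × Bool × Bool) (k : List (String × String)) :
    Bool × Bool × Bool × Bool :=
  if pvIsAnd k then
    (true, s.2.1 || PySem.Str.isIn (PySem.Str.lower (pvLookup k "text")) t, s.2.2.1, s.2.2.2)
  else if pvIsOr k then
    (s.1, s.2.1, true, s.2.2.2 || PySem.Str.isIn (PySem.Str.lower (pvLookup k "text")) t)
  else s

-- "(not has_and or hit_and) and (not has_or or hit_or)"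
def pvVerdict (s : Bool × Bool × Bool × Bool) : Bool :=
  (!s.1 || s.2.1) && (!s.2.2.1 || s.2.2.2)

def check_keyword_conditions_alt (text : String) (keywords : List (List (String × String))) : Bool :=
  if text = "" ∨ keywords = [] then false
  else if pvLookup (keywords.headD []) "text" = "" ∨
      PySem.Str.isIn (PySem.Str.lower (pvLookup (keywords.headD []) "text")) (PySem.Str.lower text) = false then false
  else
    pvVerdict (keywords.tail.foldl (pvStep (PySem.Str.lower text)) (false, false, false, false))

-- ===== PRECONDITION & SPEC =====
-- Pre_ excludes exactly the inputs where Python A raises KeyError: a missing 'text' key in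
-- keywords[0] (reached when text and keywords are non-empty), or — once the region keyword is
-- non-empty and matches and there is a tail — a tail dict missing 'condition', or missing 'text'
-- while its 'condition' is 'AND'/'OR'. Python B raises on exactly those same inputs.
def Pre_check_keyword_conditions (text : String) (keywords : List (List (String × String))) : Prop :=
  text = "" ∨ keywords = [] ∨
    (pvHasKey (keywords.headD []) "text" = true ∧
      (pvLookup (keywords.headD []) "text" = "" ∨
       PySem.Str.isIn (PySem.Str.lower (pvLookup (keywords.headD []) "text")) (PySem.Str.lower text) = false ∨
       keywords.tail = [] ∨
       ∀ d ∈ keywords.tail, pvHasKey d "condition" = true ∧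
         ((pvLookup d "condition" = "AND" ∨ pvLookup d "condition" = "OR") → pvHasKey d "text" = true)))
instance (text : String) (keywords : List (List (String × String))) : Decidable (Pre_check_keyword_conditions text keywords) := by unfold Pre_check_keyword_conditions; infer_instance

def pvWitness_check_keyword_conditions : String × (List (List (String × String))) :=
  ("buan beach trip", [[("text", "Buan")], [("condition", "AND"), ("text", "beach")], [("condition", "OR"), ("text", "sea")]])

def Spec_check_keyword_conditions (text : String) (keywords : List (List (String × String))) (out : Bool) : Prop := out = check_keyword_conditions_alt text keywords
instance (text : String) (keywords : List (List (String × String))) (out : Bool) : Decidable (Spec_check_keyword_conditions text keywords out) := by unfold Spec_check_keyword_conditions; infer_instance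

-- ===== CLAIM (what is proved, stated in full; the proofs are below) =====
def Claim_equal_check_keyword_conditions : Prop := ∀ (text : String) (keywords : List (List (String × String))), Dom_check_keyword_conditions text keywords → Pre_check_keyword_conditions text keywords → Spec_check_keyword_conditions text keywords (check_keyword_conditions text keywords)

-- ===== LEMMAS AND PROOFS =====

-- B's fold, characterised: each flag is the OR of its start value with an `any` over the list.
lemma pvStep_foldl (t : String) (l : List (List (String × String))) (s : Bool × Bool × Bool × Bool) :
    l.foldl (pvStep t) s =
      (s.1 || l.any pvIsAnd,
       s.2.1 || l.any (fun k => pvIsAnd k && PySem.Str.isIn (PySem.Str.lower (pvLookup k "text")) t),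
       s.2.2.1 || l.any pvIsOr,
       s.2.2.2 || l.any (fun k => pvIsOr k && PySem.Str.isIn (PySem.Str.lower (pvLookup k "text")) t)) := by
  induction l generalizing s with
  | nil => simp
  | cons k l ih =>
    obtain ⟨a, b, c, d⟩ := s
    have hAO : pvIsAnd k = true → pvIsOr k = false := by
      unfold pvIsAnd pvIsOr
      intro h
      rcases Bool.and_eq_true_iff.mp h with ⟨h1, _⟩
      have : pvLookup k "condition" = "AND" := by simpa using h1
      simp [this]
    simp only [List.foldl_cons, List.any_cons, ih]
    by_cases hA : pvIsAnd k = true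
    · simp [pvStep, hA, hAO hA, Bool.or_assoc]
    · by_cases hO : pvIsOr k = true
      · simp [pvStep, hA, hO, Bool.or_assoc]
      · simp [pvStep, hA, hO]

lemma pvAndK_eq_nil (keywords : List (List (String × String))) :
    pvAndK keywords = [] ↔ keywords.tail.any pvIsAnd = false := by
  unfold pvAndK
  rw [PySem.List.slice_from_one]
  simp [List.filter_eq_nil_iff, List.any_eq_false]

lemma pvOrK_eq_nil (keywords : List (List (String × String))) :
    pvOrK keywords = [] ↔ keywords.tail.any pvIsOr = false := by
  unfold pvOrK
  rw [PySem.List.slice_from_one]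
  simp [List.filter_eq_nil_iff, List.any_eq_false]

lemma pvAndK_any (text : String) (keywords : List (List (String × String))) :
    (pvAndK keywords).any (fun kw => pvMatch text kw) =
      keywords.tail.any (fun k => pvIsAnd k &&
        PySem.Str.isIn (PySem.Str.lower (pvLookup k "text")) (PySem.Str.lower text)) := by
  unfold pvAndK
  rw [PySem.List.slice_from_one]
  simp [List.any_map, List.any_filter, Function.comp, pvMatch]

lemma pvOrK_any (text : String) (keywords : List (List (String × String))) :
    (pvOrK keywords).any (fun kw => pvMatch text kw) =
      keywords.tail.any (fun k => pvIsOr k &&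
        PySem.Str.isIn (PySem.Str.lower (pvLookup k "text")) (PySem.Str.lower text)) := by
  unfold pvOrK
  rw [PySem.List.slice_from_one]
  simp [List.any_map, List.any_filter, Function.comp, pvMatch]

-- ===== VERDICT (by name: the statement is the Claim_ definition above) =====
theorem check_keyword_conditions_spec : Claim_equal_check_keyword_conditions := by
  intro text keywords _ _
  unfold Spec_check_keyword_conditions check_keyword_conditions check_keyword_conditions_alt
  by_cases h0 : text = "" ∨ keywords = []
  · rw [if_pos h0, if_pos h0]
  · rw [if_neg h0, if_neg h0]
    have hk : keywords ≠ [] := fun h => h0 (Or.inr h)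
    have hreg : pvRegion keywords = pvLookup (keywords.headD []) "text" := by
      unfold pvRegion; rw [if_neg hk]
    by_cases h1 : pvLookup (keywords.headD []) "text" = "" ∨
        PySem.Str.isIn (PySem.Str.lower (pvLookup (keywords.headD []) "text")) (PySem.Str.lower text) = false
    · rw [if_pos h1]
      rw [if_pos (show pvRegion keywords = "" ∨ pvMatch text (pvRegion keywords) = false by
        rw [hreg]; exact h1)]
    · rw [if_neg h1]
      rw [if_neg (show ¬(pvRegion keywords = "" ∨ pvMatch text (pvRegion keywords) = false) by
        rw [hreg]; exact h1)]
      rw [pvStep_foldl]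
      unfold pvVerdict
      simp only [Bool.false_or]
      by_cases hlen : keywords.length = 1
      · have htl : keywords.tail = [] := by
          cases keywords with
          | nil => exact absurd rfl hk
          | cons x xs =>
            simp only [List.length_cons, Nat.add_eq_one_iff] at hlen
            simp [List.length_eq_zero_iff.mp (by omega : xs.length = 0)]
        rw [if_pos hlen, htl]
        simp
      · rw [if_neg hlen]
        by_cases hA : keywords.tail.any pvIsAnd = true
        · by_cases hO : keywords.tail.any pvIsOr = true
          · rw [if_neg (by simp [pvAndK_eq_nil, hA]),
              if_neg (by simp [pvOrK_eq_nil, hO]),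
              if_neg (by simp [pvAndK_eq_nil, hA]),
              pvAndK_any, pvOrK_any, hA, hO]
            simp
          · have hO' := (Bool.not_eq_true _).mp hO
            rw [if_neg (by simp [pvAndK_eq_nil, hA]),
              if_pos ⟨(by simp [pvAndK_eq_nil, hA]), (pvOrK_eq_nil keywords).mpr hO'⟩,
              pvAndK_any, hA, hO']
            simp
        · have hA' := (Bool.not_eq_true _).mp hA
          by_cases hO : keywords.tail.any pvIsOr = true
          · rw [if_neg (by simp [pvAndK_eq_nil, pvOrK_eq_nil, hO]),
              if_neg (by simp [pvAndK_eq_nil, hA']),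
              if_pos ⟨(pvAndK_eq_nil keywords).mpr hA', (by simp [pvOrK_eq_nil, hO])⟩,
              pvOrK_any, hA', hO]
            simp
          · have hO' := (Bool.not_eq_true _).mp hO
            rw [if_pos ⟨(pvAndK_eq_nil keywords).mpr hA', (pvOrK_eq_nil keywords).mpr hO'⟩, hA', hO']
            simp
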